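-- pv_equiv track=rewrite | github.com/BisonLeo/usbCom | COMspeedTest.py | keepEndSpaceShort
-- ===== SOURCE A (Python) =====
-- def keepEndSpaceShort(text):
--     """ short multiple spaces into one space,
--     but for starting and ending spaces are kept the same
--     """
--     i = 0
--     j0 = j = len(text)
--     while i < j and (text[i] == ' ' or text[j-1] == ' '):
--         if text[i] == ' ':
--             i += 1
--         if text[j-1] == ' ':
--             j -= 1
--         if i > j:
--             j += 1
--
--     text = ' '.join(list(filter(None, text.split(' '))))
--     return ' '*i + text + ' '*(j0-j)
-- ===== SOURCE B (Python) =====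
-- def keepEndSpaceShort(text):
--     """ short multiple spaces into one space,
--     but for starting and ending spaces are kept the same
--     """
--     core = text.strip(' ')
--     if not core:
--         # all-space (or empty) input: nothing to collapse, keep it as is
--         return text
--     lead = len(text) - len(text.lstrip(' '))
--     trail = len(text) - len(text.rstrip(' '))
--     out = []
--     for ch in core:
--         if not (ch == ' ' and out and out[-1] == ' '):
--             out.append(ch)
--     return ' ' * lead + ''.join(out) + ' ' * trail
-- ===== Notes on version B (the rewrite author's own statement) =====
-- stated objective: simpler
-- what changed: B replaces A's interleaved two-pointer while-loop over both ends (with its crossing-correction step) by strip-based leading/trailing counts plus a single run-collapsing scan over the stripped core, with an explicit all-space guard that returns the input unchanged.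
import Mathlib
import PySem

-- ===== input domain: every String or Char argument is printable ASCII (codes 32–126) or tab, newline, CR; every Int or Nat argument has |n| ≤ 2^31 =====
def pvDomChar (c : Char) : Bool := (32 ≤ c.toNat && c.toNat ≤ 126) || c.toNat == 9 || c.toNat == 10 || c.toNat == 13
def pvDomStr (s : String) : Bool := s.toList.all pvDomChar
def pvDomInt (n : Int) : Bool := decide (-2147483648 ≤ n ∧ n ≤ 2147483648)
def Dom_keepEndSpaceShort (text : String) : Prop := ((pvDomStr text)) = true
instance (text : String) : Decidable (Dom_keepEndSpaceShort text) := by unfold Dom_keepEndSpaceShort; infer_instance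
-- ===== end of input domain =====

-- B replaces A's interleaved two-pointer while-loop by strip-based end counts plus a single
-- run-collapsing scan over the stripped core (objective: simpler); equivalence is exact.

-- ===== PORT A =====
-- A's while loop. Python's i, j start at 0 and len(text) and stay in [0, len] throughout
-- (j is restored by 'if i > j: j += 1' before it could pass below i), so Nat i j is exact.
def pvLoopA (cs : List Char) (i j : Nat) : Nat × Nat :=
  if h : i < j ∧ (cs.getD i ' ' = ' ' ∨ cs.getD (j - 1) ' ' = ' ') then
    pvLoopA cs (if cs.getD i ' ' = ' ' then i + 1 else i)
      (if (if cs.getD (j - 1) ' ' = ' ' then j - 1 else j) <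
            (if cs.getD i ' ' = ' ' then i + 1 else i)
       then (if cs.getD (j - 1) ' ' = ' ' then j - 1 else j) + 1
       else (if cs.getD (j - 1) ' ' = ' ' then j - 1 else j))
  else (i, j)
termination_by j - i
decreasing_by
  obtain ⟨h1, h2⟩ := h
  split_ifs <;> first | omega | tauto

def keepEndSpaceShort (text : String) : String :=
  let cs := text.toList
  let r := pvLoopA cs 0 cs.length
  -- ' '.join(list(filter(None, text.split(' '))))
  let mid := PySem.Chars.join [' '] ((PySem.Chars.splitOn cs [' ']).filter (fun t => t ≠ []))
  String.ofList (List.replicate r.1 ' ' ++ mid ++ List.replicate (cs.length - r.2) ' ')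

-- ===== PORT B =====
def keepEndSpaceShort_alt (text : String) : String :=
  let cs := text.toList
  let core := PySem.Chars.stripChars cs [' ']          -- text.strip(' ')
  if core = [] then text
  else
    -- len(text) - len(text.lstrip(' ')) : dropWhile (· == ' ') is exactly str.lstrip(' ') on chars
    let lead := cs.length - (cs.dropWhile (fun c => c == ' ')).length
    -- len(text) - len(text.rstrip(' ')) : rstrip(' ') = reverse ∘ dropWhile ∘ reverse, exact
    let trail := cs.length - ((cs.reverse.dropWhile (fun c => c == ' ')).reverse).length
    -- the run-collapsing loop; 'out and out[-1] == " "' is exactly out.getLast? = some ' '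
    let out := core.foldl
      (fun out ch => if ch = ' ' ∧ out.getLast? = some ' ' then out else out ++ [ch]) []
    String.ofList (List.replicate lead ' ' ++ out ++ List.replicate trail ' ')

-- ===== PRECONDITION & SPEC =====
def Spec_keepEndSpaceShort (text : String) (out : String) : Prop := out = keepEndSpaceShort_alt text
instance (text : String) (out : String) : Decidable (Spec_keepEndSpaceShort text out) := by unfold Spec_keepEndSpaceShort; infer_instance

-- ===== CLAIM (what is proved, stated in full; the proofs are below) =====
def Claim_equal_keepEndSpaceShort : Prop := ∀ (text : String), Dom_keepEndSpaceShort text → Spec_keepEndSpaceShort text (keepEndSpaceShort text)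

-- ===== LEMMAS AND PROOFS =====

-- reference split on a single space (what text.split(' ') computes)
def pvSplitSp : List Char → List (List Char)
  | [] => [[]]
  | c :: r =>
    if c = ' ' then [] :: pvSplitSp r
    else match pvSplitSp r with
      | [] => [[c]]
      | t :: ts => (c :: t) :: ts

-- run-collapsing scan with a "last emitted char was a space" flag
def pvCol (p : Bool) : List Char → List Char
  | [] => []
  | c :: r => if c = ' ' ∧ p = true then pvCol true r else c :: pvCol (c == ' ') r

def pvLead (s : List Char) : Nat := (s.takeWhile (fun c => c == ' ')).length
def pvTrail (s : List Char) : Nat := pvLead s.reverse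
def pvLstrip (s : List Char) : List Char := s.dropWhile (fun c => c == ' ')
def pvRstrip (s : List Char) : List Char := (s.reverse.dropWhile (fun c => c == ' ')).reverse

theorem pvSplitSp_ne_nil (cs : List Char) : pvSplitSp cs ≠ [] := by
  cases cs with
  | nil => simp [pvSplitSp]
  | cons c r =>
    simp only [pvSplitSp]
    split
    · simp
    · split <;> simp

theorem pv_go_spec (fuel : Nat) (cs cur : List Char) (acc : List (List Char))
    (h : cs.length < fuel) :
    PySem.Chars.splitOn.go [' '] fuel cs cur acc =
      acc.reverse ++ (match pvSplitSp cs with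
        | [] => []
        | t :: ts => (cur.reverse ++ t) :: ts) := by
  induction fuel generalizing cs cur acc with
  | zero => omega
  | succ f ih =>
    cases cs with
    | nil => simp [PySem.Chars.splitOn.go, pvSplitSp]
    | cons c rest =>
      by_cases hc : c = ' '
      · subst hc
        rw [PySem.Chars.splitOn.go]
        have hpre : [' '].isPrefixOf (' ' :: rest) = true := by simp [List.isPrefixOf]
        simp only [hpre, if_true, List.length_cons, List.length_nil, List.drop_succ_cons, List.drop_zero]
        rw [ih rest [] (cur.reverse :: acc) (by simpa using Nat.lt_of_succ_lt_succ h)]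
        rcases hsp : pvSplitSp rest with _ | ⟨t, ts⟩
        · exact absurd hsp (pvSplitSp_ne_nil rest)
        · simp [pvSplitSp, hsp]
      · rw [PySem.Chars.splitOn.go]
        have hpre : [' '].isPrefixOf (c :: rest) = false := by
          simp [List.isPrefixOf]
          exact fun hh => absurd hh.symm hc
        simp only [hpre, Bool.false_eq_true, if_false]
        rw [ih rest (c :: cur) acc (by simpa using Nat.lt_of_succ_lt_succ h)]
        rcases hsp : pvSplitSp rest with _ | ⟨t, ts⟩
        · exact absurd hsp (pvSplitSp_ne_nil rest)
        · simp [pvSplitSp, hsp, hc]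

theorem pv_splitOn_eq (cs : List Char) : PySem.Chars.splitOn cs [' '] = pvSplitSp cs := by
  unfold PySem.Chars.splitOn
  rw [pv_go_spec cs.length.succ cs [] [] (Nat.lt_succ_self _)]
  rcases hsp : pvSplitSp cs with _ | ⟨t, ts⟩
  · exact absurd hsp (pvSplitSp_ne_nil cs)
  · simp

-- the foldl in port B is pvCol
theorem pv_foldl_col (cs acc : List Char) :
    cs.foldl (fun out ch => if ch = ' ' ∧ out.getLast? = some ' ' then out else out ++ [ch]) acc
      = acc ++ pvCol (decide (acc.getLast? = some ' ')) cs := by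
  induction cs generalizing acc with
  | nil => simp [pvCol]
  | cons c r ih =>
    simp only [List.foldl_cons]
    by_cases hc : c = ' ' ∧ acc.getLast? = some ' '
    · rw [if_pos hc]
      rw [ih acc]
      simp only [pvCol, hc.1, hc.2, decide_eq_true_eq]
      simp
    · rw [if_neg hc]
      rw [ih (acc ++ [c])]
      have hlast : (acc ++ [c]).getLast? = some c := by simp
      rw [hlast]
      conv_rhs => rw [pvCol]
      rw [if_neg (by simpa using hc)]
      simp [Option.some_inj, Bool.beq_eq_decide_eq]

theorem pvCol_true (cs : List Char) : pvCol true cs = pvCol false (pvLstrip cs) := by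
  induction cs with
  | nil => simp [pvCol, pvLstrip]
  | cons c r ih =>
    by_cases hc : c = ' '
    · subst hc
      rw [pvCol, if_pos ⟨rfl, rfl⟩, ih]
      simp [pvLstrip]
    · rw [pvCol, if_neg (by simp [hc])]
      unfold pvLstrip
      rw [List.dropWhile_cons_of_neg (by simp [hc])]
      rw [pvCol, if_neg (by simp [hc])]

theorem pv_words_nil_iff (cs : List Char) :
    (pvSplitSp cs).filter (fun t => t ≠ []) = [] ↔ ∀ c ∈ cs, c = ' ' := by
  induction cs with
  | nil => simp [pvSplitSp]
  | cons c r ih =>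
    by_cases hc : c = ' '
    · subst hc
      simp only [pvSplitSp, if_pos rfl, List.filter_cons]
      simpa using ih
    · simp only [pvSplitSp, if_neg hc]
      rcases hsp : pvSplitSp r with _ | ⟨t, ts⟩
      · exact absurd hsp (pvSplitSp_ne_nil r)
      · simp [List.filter_cons, hc]

theorem pvRstrip_nil_iff (cs : List Char) : pvRstrip cs = [] ↔ ∀ c ∈ cs, c = ' ' := by
  unfold pvRstrip
  rw [List.reverse_eq_nil_iff, List.dropWhile_eq_nil_iff]
  constructor
  · intro h c hc
    simpa using h c (by simpa using hc)
  · intro h c hc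
    simpa using h c (by simpa using hc)

theorem pv_comm (cs : List Char) : pvLstrip (pvRstrip cs) = pvRstrip (pvLstrip cs) := by
  induction cs with
  | nil => simp [pvLstrip, pvRstrip]
  | cons c u ih =>
    by_cases hc : c = ' '
    · subst hc
      by_cases hu : ∀ x ∈ u, x = ' '
      · have h1 : pvRstrip (' ' :: u) = [] := (pvRstrip_nil_iff _).mpr (by
          intro x hx
          rcases List.mem_cons.mp hx with h | h
          · exact h
          · exact hu x h)
        have h2 : pvRstrip u = [] := (pvRstrip_nil_iff _).mpr hu
        have h3 : pvLstrip u = [] := by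
          unfold pvLstrip
          rw [List.dropWhile_eq_nil_iff]
          intro x hx; simp [hu x hx]
        rw [h1]
        unfold pvLstrip
        rw [List.dropWhile_cons_of_pos (by simp)]
        rw [show u.dropWhile (fun c => c == ' ') = pvLstrip u from rfl, h3]
        simp [pvRstrip, pvLstrip]
      · have h2 : pvRstrip u ≠ [] := fun h => hu ((pvRstrip_nil_iff u).mp h)
        have h1 : pvRstrip (' ' :: u) = ' ' :: pvRstrip u := by
          unfold pvRstrip
          rw [List.reverse_cons, List.dropWhile_append]
          rw [if_neg (by
            simp only [List.isEmpty_iff]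
            intro h
            exact h2 (by simp [pvRstrip, h]))]
          simp
        rw [h1]
        unfold pvLstrip
        rw [List.dropWhile_cons_of_pos (by simp), List.dropWhile_cons_of_pos (by simp)]
        exact ih
    · have h1 : pvRstrip (c :: u) = c :: pvRstrip u ∨ pvRstrip (c :: u) = [c] := by
        unfold pvRstrip
        rw [List.reverse_cons, List.dropWhile_append]
        split_ifs with h
        · right
          rw [List.dropWhile_cons_of_neg (by simp [hc])]
          simp
        · left; simp
      have hl : ∀ v : List Char, pvLstrip (c :: v) = c :: v := by
        intro v
        unfold pvLstrip
        rw [List.dropWhile_cons_of_neg (by simp [hc])]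
      rw [hl]
      rcases h1 with h1 | h1 <;> rw [h1, hl]

-- join over the head token kept
def pvF (cs : List Char) : List Char :=
  match pvSplitSp cs with
  | [] => []
  | t :: ts => PySem.Chars.join [' '] (t :: ts.filter (fun t => t ≠ []))

theorem pvRstrip_cons (c : Char) (r : List Char) :
    pvRstrip (c :: r) = if pvRstrip r = [] then (if c = ' ' then [] else [c]) else c :: pvRstrip r := by
  unfold pvRstrip
  rw [List.reverse_cons, List.dropWhile_append]
  by_cases h : List.dropWhile (fun c => c == ' ') r.reverse = []
  · rw [if_pos (by simp [h]), if_pos (by simp [h])]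
    by_cases hc : c = ' '
    · rw [if_pos hc]
      subst hc
      rw [List.dropWhile_cons_of_pos (by simp)]
      simp
    · rw [if_neg hc, List.dropWhile_cons_of_neg (by simp [hc])]
      simp
  · rw [if_neg (by simp [h]), if_neg (by simp [h])]
    simp

theorem pvJoin_cons_head (c : Char) (t : List Char) (L : List (List Char)) :
    PySem.Chars.join [' '] ((c :: t) :: L) = c :: PySem.Chars.join [' '] (t :: L) := by
  cases L with
  | nil => simp [PySem.Chars.join, List.intercalate]
  | cons l L' => simp [PySem.Chars.join, List.intercalate]

theorem pvJoin_nil_cons (l : List Char) (L : List (List Char)) :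
    PySem.Chars.join [' '] ([] :: l :: L) = ' ' :: PySem.Chars.join [' '] (l :: L) := by
  simp [PySem.Chars.join, List.intercalate]

theorem pv_g_eq_f (cs : List Char) :
    PySem.Chars.join [' '] ((pvSplitSp cs).filter (fun t => t ≠ [])) = pvF (pvLstrip cs) := by
  induction cs with
  | nil => simp [pvSplitSp, pvF, pvLstrip, PySem.Chars.join, List.intercalate]
  | cons c r ih =>
    by_cases hc : c = ' '
    · subst hc
      simp only [pvSplitSp, if_pos rfl, List.filter_cons]
      rw [show pvLstrip (' ' :: r) = pvLstrip r by
        unfold pvLstrip; rw [List.dropWhile_cons_of_pos (by simp)]]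
      simpa using ih
    · rcases hsp : pvSplitSp r with _ | ⟨t, ts⟩
      · exact absurd hsp (pvSplitSp_ne_nil r)
      · rw [show pvLstrip (c :: r) = c :: r by
          unfold pvLstrip; rw [List.dropWhile_cons_of_neg (by simp [hc])]]
        simp only [pvSplitSp, if_neg hc, hsp, pvF]
        simp [List.filter_cons]

theorem pv_f_eq_col_aux : ∀ (n : Nat) (cs : List Char), cs.length ≤ n →
    pvF cs = pvCol false (pvRstrip cs) := by
  intro n
  induction n with
  | zero =>
    intro cs h
    have : cs = [] := List.eq_nil_of_length_eq_zero (Nat.le_zero.mp h)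
    subst this
    simp [pvF, pvSplitSp, pvRstrip, pvCol, PySem.Chars.join, List.intercalate]
  | succ n ih =>
    intro cs hlen
    cases cs with
    | nil => simp [pvF, pvSplitSp, pvRstrip, pvCol, PySem.Chars.join, List.intercalate]
    | cons c r =>
      have hr : r.length ≤ n := by simpa using Nat.lt_succ_iff.mp (by simpa using hlen)
      by_cases hc : c = ' '
      · subst hc
        have hpvF : pvF (' ' :: r) =
            PySem.Chars.join [' '] ([] :: (pvSplitSp r).filter (fun t => t ≠ [])) := by
          rcases hsp : pvSplitSp r with _ | ⟨t, ts⟩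
          · exact absurd hsp (pvSplitSp_ne_nil r)
          · simp [pvF, pvSplitSp, hsp]
        rw [hpvF]
        rcases hW : (pvSplitSp r).filter (fun t => t ≠ []) with _ | ⟨l, L⟩
        · -- r is all spaces
          have hall : ∀ x ∈ r, x = ' ' := (pv_words_nil_iff r).mp hW
          have h2 : pvRstrip r = [] := (pvRstrip_nil_iff r).mpr hall
          rw [pvRstrip_cons, if_pos h2, if_pos rfl]
          simp [pvCol, PySem.Chars.join, List.intercalate]
        · have hW' : (pvSplitSp r).filter (fun t => t ≠ []) ≠ [] := by rw [hW]; simp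
          have hall : ¬ ∀ x ∈ r, x = ' ' := fun h => hW' ((pv_words_nil_iff r).mpr h)
          have h2 : pvRstrip r ≠ [] := fun h => hall ((pvRstrip_nil_iff r).mp h)
          rw [pvJoin_nil_cons, ← hW, pv_g_eq_f r]
          have hls : (pvLstrip r).length ≤ n :=
            le_trans (by simpa [pvLstrip] using List.length_dropWhile_le _ r) hr
          rw [ih (pvLstrip r) hls]
          rw [pvRstrip_cons, if_neg h2]
          rw [pvCol, if_neg (by simp)]
          rw [show ((' ' : Char) == ' ') = true by simp]
          rw [pvCol_true, pv_comm]
      · rcases hsp : pvSplitSp r with _ | ⟨t, ts⟩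
        · exact absurd hsp (pvSplitSp_ne_nil r)
        · have hpvF : pvF (c :: r) = c :: pvF r := by
            simp only [pvF, pvSplitSp, if_neg hc, hsp]
            exact pvJoin_cons_head c t (ts.filter (fun t => t ≠ []))
          rw [hpvF, ih r hr]
          rw [pvRstrip_cons]
          by_cases h2 : pvRstrip r = []
          · rw [if_pos h2, if_neg hc, h2]
            simp [pvCol, hc]
          · rw [if_neg h2]
            rw [pvCol, if_neg (by simp [hc])]
            rw [show ((c : Char) == ' ') = false by simp [hc]]

theorem pv_f_eq_col (cs : List Char) : pvF cs = pvCol false (pvRstrip cs) :=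
  pv_f_eq_col_aux cs.length cs le_rfl

theorem pv_mid_eq (cs : List Char) :
    PySem.Chars.join [' '] ((PySem.Chars.splitOn cs [' ']).filter (fun t => t ≠ []))
      = pvCol false (pvRstrip (pvLstrip cs)) := by
  rw [pv_splitOn_eq, pv_g_eq_f, pv_f_eq_col]

theorem pv_strip_eq (cs : List Char) :
    PySem.Chars.stripChars cs [' '] = pvRstrip (pvLstrip cs) := by
  have hp : (fun c => [' '].contains c) = (fun c : Char => c == ' ') := by
    funext c
    simp [Bool.beq_eq_decide_eq]
  simp only [PySem.Chars.stripChars, pvRstrip, pvLstrip, hp]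

theorem pvGetLast?_cons {a : Char} {t : List Char} (h : t ≠ []) :
    (a :: t).getLast? = t.getLast? := by
  cases t with
  | nil => exact absurd rfl h
  | cons x u => simp [List.getLast?_cons_cons]

theorem seg_len (cs : List Char) {i j : Nat} (hj : j ≤ cs.length) :
    ((cs.take j).drop i).length = j - i := by
  simp [Nat.min_eq_left hj]

theorem seg_head (cs : List Char) {i j : Nat} (hij : i < j) (hj : j ≤ cs.length) :
    ((cs.take j).drop i).head? = some (cs.getD i ' ') := by
  have hi : i < cs.length := lt_of_lt_of_le hij hj
  rw [List.head?_eq_getElem?, List.getElem?_drop, List.getElem?_take, if_pos (by omega)]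
  rw [List.getD_eq_getElem?_getD]
  simp [List.getElem?_eq_getElem hi]

theorem seg_last (cs : List Char) {i j : Nat} (hij : i < j) (hj : j ≤ cs.length) :
    ((cs.take j).drop i).getLast? = some (cs.getD (j - 1) ' ') := by
  rw [List.getLast?_eq_getElem?, seg_len cs hj]
  rw [List.getElem?_drop, List.getElem?_take, if_pos (by omega)]
  have h1 : i + (j - i - 1) = j - 1 := by omega
  rw [h1, List.getD_eq_getElem?_getD, List.getElem?_eq_getElem (by omega)]
  simp

theorem seg_tail (cs : List Char) (i j : Nat) :
    ((cs.take j).drop i).tail = (cs.take j).drop (i + 1) := List.tail_drop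

theorem seg_dropLast (cs : List Char) {i j : Nat} (hj : j ≤ cs.length) :
    ((cs.take j).drop i).dropLast = (cs.take (j - 1)).drop i := by
  apply List.ext_getElem?
  intro t
  rw [List.getElem?_dropLast, List.getElem?_drop, List.getElem?_drop,
    List.getElem?_take, List.getElem?_take, List.length_drop, List.length_take]
  split_ifs <;> first | rfl | omega

theorem pvLead_cons (c : Char) (r : List Char) :
    pvLead (c :: r) = if c = ' ' then pvLead r + 1 else 0 := by
  unfold pvLead
  rw [List.takeWhile_cons]
  by_cases hc : c = ' '
  · rw [if_pos (by simp [hc]), if_pos hc]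
    simp
  · rw [if_neg (by simp [hc]), if_neg hc]
    simp

theorem pvLead_eq_zero {s : List Char} (h : s.head? ≠ some ' ') : pvLead s = 0 := by
  cases s with
  | nil => simp [pvLead]
  | cons a t =>
    rw [pvLead_cons, if_neg]
    intro h'
    exact h (by simp [h'])

theorem pvTrail_eq_zero {s : List Char} (h : s.getLast? ≠ some ' ') : pvTrail s = 0 := by
  unfold pvTrail
  exact pvLead_eq_zero (by simpa using h)

theorem pvTrail_dropLast {s : List Char} (h : s.getLast? = some ' ') :
    pvTrail s = pvTrail s.dropLast + 1 := by
  have hne : s ≠ [] := by intro h'; rw [h'] at h; simp at h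
  have hval : s.getLast hne = ' ' := by
    have := List.getLast?_eq_getLast hne
    rw [this] at h
    exact Option.some.inj h
  unfold pvTrail
  conv_lhs => rw [← List.dropLast_append_getLast hne, hval]
  rw [List.reverse_append, List.reverse_singleton, List.singleton_append, pvLead_cons, if_pos rfl]

theorem pvLead_dropLast {s : List Char} (hl : s.getLast? = some ' ')
    (hw : ∃ c ∈ s, c ≠ ' ') : pvLead s.dropLast = pvLead s := by
  induction s with
  | nil => simp
  | cons a t ih =>
    cases ht : t with
    | nil =>
      obtain ⟨c, hc, hcne⟩ := hw
      rw [ht] at hc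
      rcases List.mem_cons.mp hc with h | h
      · subst h
        rw [ht] at hl
        simp at hl
        exact absurd hl hcne
      · simp at h
    | cons x u =>
      rw [← ht]
      have htne : t ≠ [] := by rw [ht]; simp
      rw [List.dropLast_cons_of_ne_nil htne, pvLead_cons, pvLead_cons]
      by_cases ha : a = ' '
      · rw [if_pos ha, if_pos ha]
        have hlt : t.getLast? = some ' ' := by
          rw [← pvGetLast?_cons (a := a) htne]
          exact hl
        have hwt : ∃ c ∈ t, c ≠ ' ' := by
          obtain ⟨c, hc, hcne⟩ := hw
          rcases List.mem_cons.mp hc with h | h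
          · subst h; exact absurd ha hcne
          · exact ⟨c, h, hcne⟩
        rw [ih hlt hwt]
      · rw [if_neg ha, if_neg ha]

theorem pvTrail_tail {s : List Char} (hh : s.head? = some ' ')
    (hw : ∃ c ∈ s, c ≠ ' ') : pvTrail s.tail = pvTrail s := by
  cases s with
  | nil => simp at hh
  | cons a t =>
    have ha : a = ' ' := by simpa using hh
    unfold pvTrail
    have hrev : t.reverse = (a :: t).reverse.dropLast := by
      rw [List.reverse_cons, List.dropLast_concat]
    rw [List.tail_cons, hrev]
    apply pvLead_dropLast
    · rw [List.getLast?_reverse]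
      simpa using ha
    · obtain ⟨c, hc, hcne⟩ := hw
      exact ⟨c, List.mem_reverse.mpr hc, hcne⟩

theorem pvTrail_le (s : List Char) : pvTrail s ≤ s.length := by
  unfold pvTrail pvLead
  calc (List.takeWhile (fun c => c == ' ') s.reverse).length
      ≤ s.reverse.length := List.IsPrefix.length_le (List.takeWhile_prefix _)
    _ = s.length := List.length_reverse

theorem pv_loop_spec (cs : List Char) (m i j : Nat) (hm : j - i ≤ m) (hij : i ≤ j)
    (hj : j ≤ cs.length) :
    pvLoopA cs i j =
      (if ∀ c ∈ (cs.take j).drop i, c = ' '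
       then (i + (j - i + 1) / 2, j - (j - i) / 2)
       else (i + pvLead ((cs.take j).drop i), j - pvTrail ((cs.take j).drop i))) := by
  induction m generalizing i j with
  | zero =>
    have hij' : i = j := by omega
    subst hij'
    have hs : (cs.take i).drop i = [] :=
      List.eq_nil_of_length_eq_zero (by rw [seg_len cs hj]; omega)
    rw [pvLoopA, dif_neg (by omega), hs, if_pos (by simp)]
    simp
  | succ m ih =>
    by_cases hij' : i < j
    · have hhead := seg_head cs hij' hj
      have hlast := seg_last cs hij' hj
      have hslen : ((cs.take j).drop i).length = j - i := seg_len cs hj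
      obtain ⟨t, hst⟩ := List.head?_eq_some_iff.mp hhead
      by_cases ha : cs.getD i ' ' = ' ' <;> by_cases hb : cs.getD (j - 1) ' ' = ' '
      · -- both ends are spaces
        rw [pvLoopA, dif_pos ⟨hij', Or.inl ha⟩]
        simp only [if_pos ha, if_pos hb]
        by_cases hcross : j - 1 < i + 1
        · -- j = i + 1 : the slice is a single space
          have hjr : j - 1 + 1 = j := by omega
          rw [if_pos hcross, hjr]
          rw [ih (i + 1) j (by omega) (by omega) hj]
          have hs2 : (cs.take j).drop (i + 1) = [] :=
            List.eq_nil_of_length_eq_zero (by rw [seg_len cs hj]; omega)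
          rw [hs2, if_pos (by simp)]
          have ht : t = [] := by
            have h1 := hslen
            rw [hst] at h1
            simp at h1
            exact List.eq_nil_of_length_eq_zero (by omega)
          rw [hst, ht, if_pos (by intro c hc; simpa [List.mem_singleton.mp hc] using ha)]
          rw [Prod.mk.injEq]
          constructor <;> omega
        · rw [if_neg hcross]
          have hd2 : i + 2 ≤ j := by omega
          rw [ih (i + 1) (j - 1) (by omega) (by omega) (by omega)]
          have hs2 : (cs.take (j - 1)).drop (i + 1) = ((cs.take j).drop i).tail.dropLast := by
            rw [seg_tail, seg_dropLast cs hj]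
          have htl : ((cs.take j).drop i).tail.dropLast = t.dropLast := by rw [hst]; rfl
          rw [hs2, htl]
          by_cases hall : ∀ c ∈ (cs.take j).drop i, c = ' '
          · rw [if_pos (fun c hc => hall c (by
              rw [hst]
              exact List.mem_cons_of_mem _ (List.mem_of_mem_dropLast hc)))]
            rw [if_pos hall, Prod.mk.injEq]
            constructor <;> omega
          · push_neg at hall
            obtain ⟨c, hc, hcne⟩ := hall
            have htne : t ≠ [] := by
              intro h'
              rw [hst, h'] at hslen
              simp at hslen
              omega
            have hts : t.getLast? = some ' ' := by
              rw [hst, pvGetLast?_cons htne] at hlast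
              rw [hlast]
              simpa using hb
            have hct : c ∈ t := by
              rw [hst] at hc
              rcases List.mem_cons.mp hc with h | h
              · exact absurd (h.trans ha) hcne
              · exact h
            have hcd : c ∈ t.dropLast := by
              have hlv : t.getLast htne = ' ' := by
                have h2 := List.getLast?_eq_getLast htne
                rw [h2] at hts
                exact Option.some.inj hts
              have h3 := List.dropLast_append_getLast htne
              rcases List.mem_append.mp (h3 ▸ hct) with h | h
              · exact h
              · rw [hlv] at h
                exact absurd (List.mem_singleton.mp h) hcne
            rw [if_neg (by push_neg; exact ⟨c, hcd, hcne⟩)]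
            rw [if_neg (by push_neg; exact ⟨c, hc, hcne⟩)]
            have hlead : pvLead ((cs.take j).drop i) = pvLead t.dropLast + 1 := by
              rw [hst, pvLead_cons, if_pos ha, pvLead_dropLast hts ⟨c, hct, hcne⟩]
            have htrail : pvTrail ((cs.take j).drop i) = pvTrail t.dropLast + 1 := by
              rw [pvTrail_dropLast (by rw [hlast]; simpa using hb)]
              have h1 : ((cs.take j).drop i).dropLast = cs.getD i ' ' :: t.dropLast := by
                rw [hst, List.dropLast_cons_of_ne_nil htne]
              rw [h1, ha]
              have h2 : pvTrail (' ' :: t.dropLast) = pvTrail t.dropLast := by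
                have h4 := pvTrail_tail (s := ' ' :: t.dropLast) (by simp)
                  ⟨c, List.mem_cons_of_mem _ hcd, hcne⟩
                simpa using h4.symm
              rw [h2]
            have htrail_le : pvTrail t.dropLast + 1 ≤ j - i := by
              rw [← htrail, ← hslen]
              exact pvTrail_le _
            rw [Prod.mk.injEq]
            constructor <;> omega
      · -- head space, last not
        rw [pvLoopA, dif_pos ⟨hij', Or.inl ha⟩]
        simp only [if_pos ha, if_neg hb]
        rw [if_neg (by omega)]
        rw [ih (i + 1) j (by omega) (by omega) hj]
        have htne : t ≠ [] := by
          intro h'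
          rw [hst, h'] at hlast
          simp at hlast
          exact hb (hlast.symm.trans ha)
        have hbt : cs.getD (j - 1) ' ' ∈ t := by
          apply List.mem_of_getLast?
          rw [hst, pvGetLast?_cons htne] at hlast
          exact hlast
        have hs2 : (cs.take j).drop (i + 1) = t := by
          rw [← seg_tail, hst]
          rfl
        rw [hs2, if_neg (by push_neg; exact ⟨_, hbt, hb⟩)]
        rw [if_neg (by
          push_neg
          refine ⟨cs.getD (j - 1) ' ', ?_, hb⟩
          rw [hst]
          exact List.mem_cons_of_mem _ hbt)]
        have hlead : pvLead ((cs.take j).drop i) = pvLead t + 1 := by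
          rw [hst, pvLead_cons, if_pos ha]
        have htrail0 : pvTrail ((cs.take j).drop i) = 0 :=
          pvTrail_eq_zero (by rw [hlast]; simpa using hb)
        have htrailt : pvTrail t = 0 := by
          apply pvTrail_eq_zero
          rw [hst, pvGetLast?_cons htne] at hlast
          rw [hlast]
          simpa using hb
        rw [Prod.mk.injEq]
        constructor <;> omega
      · -- last space, head not
        rw [pvLoopA, dif_pos ⟨hij', Or.inr hb⟩]
        simp only [if_neg ha, if_pos hb]
        rw [if_neg (by omega)]
        rw [ih i (j - 1) (by omega) (by omega) (by omega)]
        have htne : t ≠ [] := by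
          intro h'
          rw [hst, h'] at hlast
          simp at hlast
          exact ha (hlast.trans hb)
        have hs2 : (cs.take (j - 1)).drop i = ((cs.take j).drop i).dropLast := by
          rw [seg_dropLast cs hj]
        have hsd : ((cs.take j).drop i).dropLast = cs.getD i ' ' :: t.dropLast := by
          rw [hst, List.dropLast_cons_of_ne_nil htne]
        rw [hs2, hsd]
        rw [if_neg (by push_neg; exact ⟨_, List.mem_cons_self, ha⟩)]
        rw [if_neg (by
          push_neg
          refine ⟨cs.getD i ' ', ?_, ha⟩
          rw [hst]
          exact List.mem_cons_self)]
        have hlead0 : pvLead ((cs.take j).drop i) = 0 := by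
          rw [hst, pvLead_cons, if_neg ha]
        have hleadd : pvLead (cs.getD i ' ' :: t.dropLast) = 0 := by
          rw [pvLead_cons, if_neg ha]
        have htrail : pvTrail ((cs.take j).drop i) = pvTrail (cs.getD i ' ' :: t.dropLast) + 1 := by
          rw [pvTrail_dropLast (by rw [hlast]; simpa using hb), hsd]
        have htrail_le : pvTrail (cs.getD i ' ' :: t.dropLast) + 1 ≤ j - i := by
          rw [← htrail, ← hslen]
          exact pvTrail_le _
        rw [Prod.mk.injEq]
        constructor <;> omega
      · -- neither end a space : the loop stops
        rw [pvLoopA, dif_neg (by push_neg; intro _; exact ⟨ha, hb⟩)]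
        rw [if_neg (by
          push_neg
          refine ⟨cs.getD i ' ', ?_, ha⟩
          rw [hst]
          exact List.mem_cons_self)]
        have hlead0 : pvLead ((cs.take j).drop i) = 0 := by
          rw [hst, pvLead_cons, if_neg ha]
        have htrail0 : pvTrail ((cs.take j).drop i) = 0 :=
          pvTrail_eq_zero (by rw [hlast]; simpa using hb)
        rw [hlead0, htrail0]
        simp
    · have hij'' : i = j := by omega
      subst hij''
      have hs : (cs.take i).drop i = [] :=
        List.eq_nil_of_length_eq_zero (by rw [seg_len cs hj]; omega)
      rw [pvLoopA, dif_neg (by omega), hs, if_pos (by simp)]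
      simp

theorem pv_main (text : String) : keepEndSpaceShort text = keepEndSpaceShort_alt text := by
  unfold keepEndSpaceShort keepEndSpaceShort_alt
  simp only []
  have hloop := pv_loop_spec text.toList text.toList.length 0 text.toList.length
    (by omega) (Nat.zero_le _) (le_refl _)
  rw [List.take_length, List.drop_zero] at hloop
  have hmid := pv_mid_eq text.toList
  have hstrip := pv_strip_eq text.toList
  by_cases hall : ∀ c ∈ text.toList, c = ' '
  · -- all-space (or empty) input
    have hstripnil : PySem.Chars.stripChars text.toList [' '] = [] := by
      rw [hstrip]
      apply (pvRstrip_nil_iff _).mpr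
      intro c hc
      exact hall c ((List.dropWhile_sublist _).subset hc)
    rw [if_pos hstripnil]
    rw [hloop, if_pos hall]
    simp only [Nat.zero_add, Nat.sub_zero]
    have hmid0 : PySem.Chars.join [' ']
        ((PySem.Chars.splitOn text.toList [' ']).filter (fun t => t ≠ [])) = [] := by
      rw [hmid, ← hstrip, hstripnil]
      rfl
    rw [hmid0]
    have hn2 : text.toList.length - (text.toList.length - text.toList.length / 2)
        = text.toList.length / 2 := by omega
    have hrepl : List.replicate ((text.toList.length + 1) / 2) ' ' ++ ([] : List Char) ++
        List.replicate (text.toList.length / 2) ' ' = List.replicate text.toList.length ' ' := by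
      rw [List.append_nil, ← List.replicate_add]
      congr 1
      omega
    rw [hn2, hrepl]
    have hcs : text.toList = List.replicate text.toList.length ' ' :=
      List.eq_replicate_iff.mpr ⟨rfl, hall⟩
    rw [← hcs, String.ofList_toList]
  · have hstripne : PySem.Chars.stripChars text.toList [' '] ≠ [] := by
      rw [hstrip]
      intro h
      apply hall
      intro c hc
      by_contra hcne
      -- c is a non-space char of cs, so it survives lstrip and rstrip
      have h1 : c ∈ pvLstrip text.toList := by
        unfold pvLstrip
        have := List.takeWhile_append_dropWhile
          (p := fun c : Char => c == ' ') (l := text.toList)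
        rcases List.mem_append.mp (this ▸ hc) with h2 | h2
        · have := List.mem_takeWhile_imp h2
          simp at this
          exact absurd this hcne
        · exact h2
      have h2 : c ∈ pvRstrip (pvLstrip text.toList) := by
        unfold pvRstrip
        rw [List.mem_reverse]
        have := List.takeWhile_append_dropWhile
          (p := fun c : Char => c == ' ') (l := (pvLstrip text.toList).reverse)
        rcases List.mem_append.mp (this ▸ List.mem_reverse.mpr h1) with h3 | h3
        · have := List.mem_takeWhile_imp h3
          simp at this
          exact absurd this hcne
        · exact h3
      rw [h] at h2
      simp at h2
    rw [if_neg hstripne]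
    rw [hloop, if_neg hall]
    simp only [Nat.zero_add]
    -- lead and trail counts agree
    have hlead : text.toList.length - (text.toList.dropWhile (fun c => c == ' ')).length
        = pvLead text.toList := by
      have h1 := List.takeWhile_append_dropWhile
        (p := fun c : Char => c == ' ') (l := text.toList)
      have h2 : pvLead text.toList + (text.toList.dropWhile (fun c => c == ' ')).length
          = text.toList.length := by
        unfold pvLead
        rw [← List.length_append, h1]
      omega
    have htrail : text.toList.length - ((text.toList.reverse.dropWhile (fun c => c == ' ')).reverse).length
        = pvTrail text.toList := by
      have h1 := List.takeWhile_append_dropWhile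
        (p := fun c : Char => c == ' ') (l := text.toList.reverse)
      have h2 : pvTrail text.toList + (text.toList.reverse.dropWhile (fun c => c == ' ')).length
          = text.toList.length := by
        unfold pvTrail pvLead
        rw [← List.length_append, h1, List.length_reverse]
      rw [List.length_reverse]
      omega
    have htrail2 : text.toList.length - (text.toList.length - pvTrail text.toList)
        = pvTrail text.toList := by
      have := pvTrail_le text.toList
      omega
    have hout : (PySem.Chars.stripChars text.toList [' ']).foldl
        (fun out ch => if ch = ' ' ∧ out.getLast? = some ' ' then out else out ++ [ch]) []
        = pvCol false (pvRstrip (pvLstrip text.toList)) := by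
      rw [pv_foldl_col, hstrip]
      simp
    rw [hout, hmid, hlead, htrail, htrail2]

-- ===== VERDICT (by name: the statement is the Claim_ definition above) =====
theorem keepEndSpaceShort_spec : Claim_equal_keepEndSpaceShort := by
  intro text _
  exact pv_main text
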